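-- pv_equiv track=rewrite | github.com/torbvat/PerfEngAssignment2 | plotting .py | ProcessSample
-- ===== SOURCE A (Python) =====
-- def ProcessSample(minimumValue, sample):
--     sample.sort()
--     times = []
--     counts = []
--     count = len(sample)
--     times.append(minimumValue)
--     counts.append(count)
--     for x in sample:
--         times.append(x)
--         count -= 1
--         counts.append(count)
--     return (times, counts)
-- ===== SOURCE B (Python) =====
-- def ProcessSample(minimumValue, sample):
--     sample.sort()
--     # Build (time, count) pairs back-to-front: walk the sorted data in reverse
--     # with an ascending survivor counter, then reverse once and unzip.
--     pairs = []
--     c = 0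
--     for x in reversed(sample):
--         pairs.append((x, c))
--         c += 1
--     pairs.append((minimumValue, c))
--     pairs.reverse()
--     times = [t for t, _ in pairs]
--     counts = [n for _, n in pairs]
--     return (times, counts)
-- ===== Notes on version B (the rewrite author's own statement) =====
-- stated objective: alternative
-- what changed: Instead of a forward pass decrementing a countdown into two parallel lists, B walks the sorted sample in reverse with an ascending counter, accumulates one list of (time,count) pairs back-to-front, then reverses and unzips it.
import Mathlib
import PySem

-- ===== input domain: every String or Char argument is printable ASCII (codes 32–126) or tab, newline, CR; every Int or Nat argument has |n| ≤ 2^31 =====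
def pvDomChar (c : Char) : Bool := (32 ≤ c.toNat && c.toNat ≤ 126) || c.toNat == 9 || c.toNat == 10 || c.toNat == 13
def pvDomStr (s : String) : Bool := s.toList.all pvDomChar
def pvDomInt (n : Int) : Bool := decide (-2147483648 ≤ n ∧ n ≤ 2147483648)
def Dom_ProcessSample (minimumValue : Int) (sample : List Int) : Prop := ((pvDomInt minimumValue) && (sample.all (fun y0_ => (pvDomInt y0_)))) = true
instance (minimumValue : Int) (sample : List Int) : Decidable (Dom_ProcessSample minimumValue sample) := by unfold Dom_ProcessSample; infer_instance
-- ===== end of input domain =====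

-- B builds the result as one reversed list of (time,count) pairs instead of A's forward countdown
-- into two parallel lists (objective: alternative decomposition, same cost).
-- Python A sorts `sample` in place (a caller-visible mutation); B does the same.
-- The equivalence proved here is about the return value.

-- ===== PORT A =====
def ProcessSample (minimumValue : Int) (sample : List Int) : List Int × List Int :=
  let s := PySem.List.sorted sample (fun x => x)
  let times : List Int := []
  let counts : List Int := []
  let count : Int := s.length
  let times := times ++ [minimumValue]
  let counts := counts ++ [count]
  let st := s.foldl (fun (st : List Int × List Int × Int) x =>
    (st.1 ++ [x], st.2.1 ++ [st.2.2 - 1], st.2.2 - 1)) (times, counts, count)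
  (st.1, st.2.1)

-- ===== PORT B =====
def ProcessSample_alt (minimumValue : Int) (sample : List Int) : List Int × List Int :=
  let s := PySem.List.sorted sample (fun x => x)
  let st := s.reverse.foldl (fun (st : List (Int × Int) × Int) x =>
    (st.1 ++ [(x, st.2)], st.2 + 1)) ([], 0)
  let pairs := (st.1 ++ [(minimumValue, st.2)]).reverse
  (pairs.map Prod.fst, pairs.map Prod.snd)

-- ===== PRECONDITION & SPEC =====
def Spec_ProcessSample (minimumValue : Int) (sample : List Int) (out : List Int × List Int) : Prop := out = ProcessSample_alt minimumValue sample
instance (minimumValue : Int) (sample : List Int) (out : List Int × List Int) : Decidable (Spec_ProcessSample minimumValue sample out) := by unfold Spec_ProcessSample; infer_instance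

-- ===== CLAIM (what is proved, stated in full; the proofs are below) =====
def Claim_equal_ProcessSample : Prop := ∀ (minimumValue : Int) (sample : List Int), Dom_ProcessSample minimumValue sample → Spec_ProcessSample minimumValue sample (ProcessSample minimumValue sample)

-- ===== LEMMAS AND PROOFS =====

def pvRangeFrom (c : Int) (n : Nat) : List Int := (List.range n).map (fun k : Nat => c + (k : Int))

theorem pvRangeFrom_succ (c : Int) (n : Nat) :
    pvRangeFrom c (n + 1) = c :: pvRangeFrom (c + 1) n := by
  unfold pvRangeFrom
  rw [List.range_succ_eq_map, List.map_cons, List.map_map]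
  norm_num
  exact fun a _ => by ring

theorem pvRangeFrom_snoc (n : Nat) :
    pvRangeFrom 0 (n + 1) = pvRangeFrom 0 n ++ [(n : Int)] := by
  unfold pvRangeFrom
  rw [List.range_succ, List.map_append]
  simp

-- A's forward countdown loop.
theorem pv_range_map_shift (n : Nat) (c : Int) :
    (List.range (n + 1)).map (fun k : Nat => c - ((k : Int) + 1))
    = (c - 1) :: (List.range n).map (fun k : Nat => (c - 1) - ((k : Int) + 1)) := by
  rw [List.range_succ_eq_map, List.map_cons, List.map_map]
  norm_num
  exact fun a _ => by ring

theorem ProcessSample_foldA (l ts cs : List Int) (c : Int) :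
    l.foldl (fun (st : List Int × List Int × Int) x =>
      (st.1 ++ [x], st.2.1 ++ [st.2.2 - 1], st.2.2 - 1)) (ts, cs, c)
    = (ts ++ l, cs ++ (List.range l.length).map (fun k : Nat => c - ((k : Int) + 1)), c - l.length) := by
  induction l generalizing ts cs c with
  | nil => simp
  | cons x xs ih =>
    simp only [List.foldl_cons, ih, List.length_cons, pv_range_map_shift]
    refine Prod.ext (by simp) (Prod.ext (by simp) (by push_cast; ring))

-- B's pair-building loop: pairs the elements with an ascending counter.
theorem ProcessSample_foldB (l : List Int) (acc : List (Int × Int)) (c : Int) :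
    l.foldl (fun (st : List (Int × Int) × Int) x =>
      (st.1 ++ [(x, st.2)], st.2 + 1)) (acc, c)
    = (acc ++ l.zip (pvRangeFrom c l.length), c + l.length) := by
  induction l generalizing acc c with
  | nil => simp [pvRangeFrom]
  | cons x xs ih =>
    simp only [List.foldl_cons, ih, List.length_cons, pvRangeFrom_succ, List.zip_cons_cons]
    refine Prod.ext (by simp) (by push_cast; ring)

theorem pvRangeFrom_reverse (n : Nat) :
    (pvRangeFrom 0 n).reverse = (List.range n).map (fun k : Nat => (n : Int) - ((k : Int) + 1)) := by
  induction n with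
  | zero => simp [pvRangeFrom]
  | succ m ih =>
    rw [pvRangeFrom_snoc, List.reverse_append, List.reverse_singleton, ih,
      List.range_succ_eq_map, List.map_cons, List.map_map]
    push_cast
    norm_num

theorem pvRangeFrom_length (c : Int) (n : Nat) : (pvRangeFrom c n).length = n := by
  simp [pvRangeFrom]

-- ===== VERDICT (by name: the statement is the Claim_ definition above) =====
theorem ProcessSample_spec : Claim_equal_ProcessSample := by
  intro m sample _
  unfold Spec_ProcessSample ProcessSample ProcessSample_alt
  simp only [ProcessSample_foldA, ProcessSample_foldB, List.nil_append, List.length_reverse]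
  set s := PySem.List.sorted sample (fun x => x) with hs
  have hlen : (s.reverse.zip (pvRangeFrom 0 s.length)).length ≤ s.length := by
    simp
  rw [List.reverse_append, List.reverse_singleton]
  refine Prod.ext ?_ ?_
  · show [m] ++ s = _
    simp only [List.map_cons, List.singleton_append, List.map_reverse]
    rw [List.map_fst_zip (by simp [pvRangeFrom_length])]
    simp
  · show ([(s.length : Int)] ++ (List.range s.length).map (fun k : Nat => (s.length : Int) - ((k : Int) + 1))) = _
    simp only [List.map_cons, List.singleton_append, List.map_reverse]
    rw [List.map_snd_zip (by simp [pvRangeFrom_length]), pvRangeFrom_reverse]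
    simp
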